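-- pv_equiv track=rewrite | github.com/BlackRoad-OS-Inc/blackroad | orgs/blackroad-os/blackroad-warehouse-robot/src/warehouse_robot.py | optimize_pick_sequence
-- ===== SOURCE A (Python) =====
-- from typing import Optional, List, Dict, Tuple
--
-- def optimize_pick_sequence(tasks: List[Dict], start_aisle: int, start_shelf: int) -> List[Dict]:
--     """
--     Greedy nearest-pick sequencing (S-shape + nearest-neighbour).
--     Groups by aisle, alternates direction to minimize travel.
--     """
--     if not tasks: return tasks
--     by_aisle: Dict[int, List[Dict]] = {}
--     for t in tasks:
--         by_aisle.setdefault(t["aisle"], []).append(t)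
--     # Sort shelves within each aisle, alternating direction
--     result = []
--     aisles = sorted(by_aisle.keys())
--     for i, aisle in enumerate(aisles):
--         shelf_tasks = sorted(by_aisle[aisle], key=lambda t: t["shelf"],
--                              reverse=(i % 2 == 1))
--         result.extend(shelf_tasks)
--     for seq, t in enumerate(result):
--         t["sequence"] = seq
--     return result
-- ===== SOURCE B (Python) =====
-- def optimize_pick_sequence(tasks, start_aisle, start_shelf):
--     if not tasks:
--         return tasks
--     aisles = sorted({t["aisle"] for t in tasks})
--     result = [t
--               for i, aisle in enumerate(aisles)
--               for t in sorted((u for u in tasks if u["aisle"] == aisle),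
--                               key=lambda u: u["shelf"], reverse=i % 2 == 1)]
--     for seq, t in enumerate(result):
--         t["sequence"] = seq
--     return result
-- ===== Notes on version B (the rewrite author's own statement) =====
-- stated objective: simpler
-- what changed: B drops A's setdefault-dict grouping pass: it sorts the distinct aisles directly and builds the result with one comprehension that filters-and-sorts the task list per aisle, then assigns sequence numbers.
import Mathlib
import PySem

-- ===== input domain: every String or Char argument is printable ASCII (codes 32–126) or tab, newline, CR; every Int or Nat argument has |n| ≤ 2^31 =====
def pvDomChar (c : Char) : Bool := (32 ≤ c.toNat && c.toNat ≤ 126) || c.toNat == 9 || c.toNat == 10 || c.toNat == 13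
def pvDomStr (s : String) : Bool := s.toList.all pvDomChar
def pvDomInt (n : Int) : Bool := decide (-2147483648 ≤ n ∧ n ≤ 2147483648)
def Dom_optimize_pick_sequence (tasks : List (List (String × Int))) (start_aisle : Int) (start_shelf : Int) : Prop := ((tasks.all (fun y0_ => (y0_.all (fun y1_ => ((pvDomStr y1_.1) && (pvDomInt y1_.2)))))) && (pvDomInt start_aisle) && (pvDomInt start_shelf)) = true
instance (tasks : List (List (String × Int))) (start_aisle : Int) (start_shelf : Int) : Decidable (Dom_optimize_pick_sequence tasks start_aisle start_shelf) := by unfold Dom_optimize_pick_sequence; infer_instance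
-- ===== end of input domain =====

-- B replaces A's setdefault-dict grouping pass by sorting the distinct aisles directly and filtering the
-- task list per aisle (a comprehension); A mutates the task dicts in place ("sequence" key) — the
-- equivalence proved here is about the RETURN value (B performs the same mutation in Python).

-- shared transliteration helpers: t["aisle"], t["shelf"], and the final 'for seq, t in enumerate(result): t["sequence"] = seq' loop
def pvAisle (t : List (String × Int)) : Int := (PySem.Dict.mk t).getD "aisle" 0
def pvShelf (t : List (String × Int)) : Int := (PySem.Dict.mk t).getD "shelf" 0
def pvSetSeq (result : List (List (String × Int))) : List (List (String × Int)) :=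
  (PySem.List.enumerate result).map (fun p => ((PySem.Dict.mk p.2).insert "sequence" p.1).items)

-- ===== PORT A =====
def optimize_pick_sequence (tasks : List (List (String × Int))) (start_aisle : Int) (start_shelf : Int) : List (List (String × Int)) :=
  if tasks = [] then tasks
  else
    -- by_aisle.setdefault(t["aisle"], []).append(t)
    let by_aisle : PySem.Dict Int (List (List (String × Int))) :=
      tasks.foldl (fun d t => d.modify (pvAisle t) [] (fun g => g ++ [t])) PySem.Dict.empty
    let aisles := PySem.List.sorted by_aisle.keys (fun a => a)
    let result := (PySem.List.enumerate aisles).foldl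
      (fun acc p => acc ++ PySem.List.sorted (by_aisle.getD p.2 []) pvShelf (PySem.Int.mod p.1 2 == 1)) []
    pvSetSeq result

-- ===== PORT B =====
def optimize_pick_sequence_alt (tasks : List (List (String × Int))) (start_aisle : Int) (start_shelf : Int) : List (List (String × Int)) :=
  if tasks = [] then tasks
  else
    let aisles := PySem.List.sorted (PySem.Set.ofList (tasks.map pvAisle)) (fun a => a)
    let result := (PySem.List.enumerate aisles).flatMap
      (fun p => PySem.List.sorted (tasks.filter (fun u => pvAisle u == p.2)) pvShelf (PySem.Int.mod p.1 2 == 1))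
    pvSetSeq result

-- ===== PRECONDITION & SPEC =====
-- Pre_ excludes exactly the tasks missing an "aisle" or "shelf" key, on which Python A raises KeyError.
def Pre_optimize_pick_sequence (tasks : List (List (String × Int))) (start_aisle : Int) (start_shelf : Int) : Prop :=
  ∀ t ∈ tasks, (PySem.Dict.mk t).contains "aisle" = true ∧ (PySem.Dict.mk t).contains "shelf" = true
instance (tasks : List (List (String × Int))) (start_aisle : Int) (start_shelf : Int) : Decidable (Pre_optimize_pick_sequence tasks start_aisle start_shelf) := by unfold Pre_optimize_pick_sequence; infer_instance
def pvWitness_optimize_pick_sequence : (List (List (String × Int))) × Int × Int :=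
  ([[("aisle", 2), ("shelf", 5)], [("aisle", 1), ("shelf", 3)], [("aisle", 2), ("shelf", 1)]], 0, 0)

def Spec_optimize_pick_sequence (tasks : List (List (String × Int))) (start_aisle : Int) (start_shelf : Int) (out : List (List (String × Int))) : Prop := out = optimize_pick_sequence_alt tasks start_aisle start_shelf
instance (tasks : List (List (String × Int))) (start_aisle : Int) (start_shelf : Int) (out : List (List (String × Int))) : Decidable (Spec_optimize_pick_sequence tasks start_aisle start_shelf out) := by unfold Spec_optimize_pick_sequence; infer_instance

-- ===== CLAIM (what is proved, stated in full; the proofs are below) =====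
def Claim_equal_optimize_pick_sequence : Prop := ∀ (tasks : List (List (String × Int))) (start_aisle : Int) (start_shelf : Int), Dom_optimize_pick_sequence tasks start_aisle start_shelf → Pre_optimize_pick_sequence tasks start_aisle start_shelf → Spec_optimize_pick_sequence tasks start_aisle start_shelf (optimize_pick_sequence tasks start_aisle start_shelf)

-- ===== LEMMAS AND PROOFS =====

-- A's grouping dict looked up at aisle c is exactly the filter of the task list B uses
lemma group_getD (tasks : List (List (String × Int))) (c : Int) :
    (tasks.foldl (fun d t => d.modify (pvAisle t) [] (fun g => g ++ [t])) PySem.Dict.empty).getD c []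
      = tasks.filter (fun u => pvAisle u == c) := by
  have h := PySem.Dict.getD_foldl_modify_append (tasks.map (fun t => (pvAisle t, t))) PySem.Dict.empty c
  rw [List.foldl_map] at h
  simpa [List.filter_map, List.map_map, Function.comp_def, List.map_id'] using h

-- A's dict keys are the distinct aisles in first-occurrence order, i.e. B's set
lemma group_keys (tasks : List (List (String × Int))) :
    (tasks.foldl (fun d t => d.modify (pvAisle t) [] (fun g => g ++ [t])) PySem.Dict.empty).keys
      = PySem.Set.ofList (tasks.map pvAisle) := by
  have h := PySem.Dict.keys_foldl_modify_key tasks pvAisle ([] : List (List (String × Int)))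
      (fun _ t => (fun g => g ++ [t])) PySem.Dict.empty
  simpa [PySem.Dict.keys_empty, PySem.Set.update, PySem.Set.ofList_eq_foldl] using h

-- ===== VERDICT (by name: the statement is the Claim_ definition above) =====
theorem optimize_pick_sequence_spec : Claim_equal_optimize_pick_sequence := by
  intro tasks sa ss _hd _hp
  unfold Spec_optimize_pick_sequence optimize_pick_sequence optimize_pick_sequence_alt
  by_cases h : tasks = []
  · simp [h]
  · simp only [if_neg h]
    rw [group_keys]
    have hcongr : ∀ (acc : List (List (String × Int))) (p : Int × Int),
        p ∈ PySem.List.enumerate (PySem.List.sorted (PySem.Set.ofList (tasks.map pvAisle)) (fun a => a)) →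
        acc ++ PySem.List.sorted
            ((tasks.foldl (fun d t => d.modify (pvAisle t) [] (fun g => g ++ [t])) PySem.Dict.empty).getD p.2 [])
            pvShelf (PySem.Int.mod p.1 2 == 1)
          = acc ++ PySem.List.sorted (tasks.filter (fun u => pvAisle u == p.2)) pvShelf (PySem.Int.mod p.1 2 == 1) := by
      intro acc p _
      rw [group_getD]
    rw [PySem.List.foldl_congr_mem _ _ _ _ hcongr]
    rw [PySem.List.foldl_append_eq_flatMap
      (fun (p : Int × Int) => PySem.List.sorted (tasks.filter (fun u => pvAisle u == p.2)) pvShelf (PySem.Int.mod p.1 2 == 1))]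
    simp
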